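-- pv_equiv track=rewrite | github.com/rhobots-ai/studio | core/remote_api_responder.py | _extract_instruction_from_prompt
-- ===== SOURCE A (Python) =====
-- def _extract_instruction_from_prompt(prompt: str) -> str:
--     """
--     Extract instruction from the formatted prompt
--     Handles the format: ### Instruction:\n{instruction}\n\n### Input:\n{input}\n\n### Response:\n
--     """
--     try:
--         # Look for instruction section
--         if "### Instruction:" in prompt:
--             start = prompt.find("### Instruction:") + len("### Instruction:")
--
--             # Find the end of instruction (next ### section or end)
--             end_markers = ["### Input:", "### Response:", "###"]
--             end = len(prompt)
--
--             for marker in end_markers: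
--                 marker_pos = prompt.find(marker, start)
--                 if marker_pos != -1:
--                     end = min(end, marker_pos)
--
--             instruction = prompt[start:end].strip()
--             return instruction if instruction else "Extract the required information from the following data."
--
--         # Fallback: use the entire prompt as instruction
--         return prompt.strip()
--
--     except Exception:
--         return "Extract the required information from the following data."
-- ===== SOURCE B (Python) =====
-- _DEFAULT = "Extract the required information from the following data."
--
-- def _extract_instruction_from_prompt(prompt: str) -> str:
--     # Single scan: every end marker starts with "###", so the first "###"
--     # after the instruction header is exactly A's min over the marker list.
--     marker = "### Instruction:"
--     i = prompt.find(marker)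
--     if i == -1:
--         return prompt.strip()
--     start = i + len(marker)
--     j = prompt.find("###", start)
--     end = len(prompt) if j == -1 else j
--     instruction = prompt[start:end].strip()
--     return instruction or _DEFAULT
-- ===== Notes on version B (the rewrite author's own statement) =====
-- stated objective: simpler
-- what changed: Replaces the min-over-three-end-markers scan loop with a single find of the next "###" after the header (every end marker begins with "###", so the first "###" is the minimum), and replaces the separate membership test with one find call.
import Mathlib
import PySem

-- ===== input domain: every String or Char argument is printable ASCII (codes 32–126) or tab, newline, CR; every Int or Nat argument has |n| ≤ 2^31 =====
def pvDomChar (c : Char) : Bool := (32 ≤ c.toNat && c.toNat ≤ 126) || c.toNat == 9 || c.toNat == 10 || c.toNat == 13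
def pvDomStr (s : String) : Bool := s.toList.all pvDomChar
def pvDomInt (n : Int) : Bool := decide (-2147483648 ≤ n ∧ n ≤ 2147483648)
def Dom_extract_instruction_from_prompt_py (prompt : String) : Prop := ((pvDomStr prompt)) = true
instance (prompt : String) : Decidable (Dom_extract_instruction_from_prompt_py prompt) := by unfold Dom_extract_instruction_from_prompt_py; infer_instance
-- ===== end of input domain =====

-- B replaces A's min-over-three-end-markers loop by a single find of the next "###"
-- (every end marker starts with "###"), a simpler one-scan formulation of the same value.

-- ===== PORT A =====
-- A's try/except arm is dead code: no operation in the body can raise, so it is not ported.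
def pvDefaultInstruction : String := "Extract the required information from the following data."

def extract_instruction_from_prompt_py (prompt : String) : String :=
  if PySem.Str.isIn "### Instruction:" prompt then
    let start : Int := PySem.Str.find prompt "### Instruction:" + PySem.Str.len "### Instruction:"
    let end_markers : List String := ["### Input:", "### Response:", "###"]
    let endv : Int := end_markers.foldl (fun e marker =>
      let marker_pos := PySem.Str.findFrom prompt marker start
      if marker_pos ≠ -1 then min e marker_pos else e) (PySem.Str.len prompt)
    let instruction := PySem.Str.strip (PySem.Str.slice prompt (some start) (some endv))
    if instruction ≠ "" then instruction else pvDefaultInstruction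
  else
    PySem.Str.strip prompt

-- ===== PORT B =====
def extract_instruction_from_prompt_py_alt (prompt : String) : String :=
  let i := PySem.Str.find prompt "### Instruction:"
  if i = -1 then
    PySem.Str.strip prompt
  else
    let start : Int := i + PySem.Str.len "### Instruction:"
    let j := PySem.Str.findFrom prompt "###" start
    let endv : Int := if j = -1 then PySem.Str.len prompt else j
    let instruction := PySem.Str.strip (PySem.Str.slice prompt (some start) (some endv))
    if instruction = "" then pvDefaultInstruction else instruction


-- ===== PRECONDITION & SPEC =====
def Spec_extract_instruction_from_prompt_py (prompt : String) (out : String) : Prop := out = extract_instruction_from_prompt_py_alt prompt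
instance (prompt : String) (out : String) : Decidable (Spec_extract_instruction_from_prompt_py prompt out) := by unfold Spec_extract_instruction_from_prompt_py; infer_instance

-- ===== CLAIM (what is proved, stated in full; the proofs are below) =====
def Claim_equal_extract_instruction_from_prompt_py : Prop := ∀ (prompt : String), Dom_extract_instruction_from_prompt_py prompt → Spec_extract_instruction_from_prompt_py prompt (extract_instruction_from_prompt_py prompt)

-- ===== LEMMAS AND PROOFS =====

-- If sub2 is a prefix of sub1 and sub1 occurs in t, then sub2 occurs in t, no later.
theorem pv_find_prefix_mono (t sub1 sub2 : List Char) (hp : sub2 <+: sub1)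
    (h : PySem.Chars.find t sub1 ≠ -1) :
    PySem.Chars.find t sub2 ≠ -1 ∧ PySem.Chars.find t sub2 ≤ PySem.Chars.find t sub1 := by
  have h1 : 0 ≤ PySem.Chars.find t sub1 := by
    have := PySem.Chars.neg_one_le_find t sub1; omega
  obtain ⟨hpre1, _⟩ := PySem.Chars.find_spec h1
  have hpre2 : sub2 <+: t.drop (PySem.Chars.find t sub1).toNat := hp.trans hpre1
  have h2ne : PySem.Chars.find t sub2 ≠ -1 := by
    rw [PySem.Chars.find_ne_neg_one_iff, ← PySem.Chars.isIn_iff_infix,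
      ← PySem.Chars.exists_prefix_drop_iff_isIn]
    exact ⟨_, hpre2⟩
  have h2 : 0 ≤ PySem.Chars.find t sub2 := by
    have := PySem.Chars.neg_one_le_find t sub2; omega
  obtain ⟨_, hmin⟩ := PySem.Chars.find_spec h2
  refine ⟨h2ne, ?_⟩
  by_contra hlt
  exact hmin _ (by omega) hpre2

theorem pv_end_eq (prompt : String) (kk : Nat) (hkk : kk ≤ prompt.toList.length) :
    (["### Input:", "### Response:", "###"] : List String).foldl
      (fun e marker =>
        if PySem.Str.findFrom prompt marker ((kk : Int)) ≠ -1
        then min e (PySem.Str.findFrom prompt marker ((kk : Int))) else e)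
      (PySem.Str.len prompt)
    = (if PySem.Str.findFrom prompt "###" ((kk : Int)) = -1 then PySem.Str.len prompt
       else PySem.Str.findFrom prompt "###" ((kk : Int))) := by
  have hF : ∀ m : String, PySem.Str.findFrom prompt m ((kk : Int)) =
      if PySem.Chars.find (prompt.toList.drop kk) m.toList = -1 then -1
      else (kk : Int) + PySem.Chars.find (prompt.toList.drop kk) m.toList := by
    intro m
    rw [PySem.Str.findFrom_eq, PySem.Chars.findFrom_natCast _ _ kk hkk]
  set d := prompt.toList.drop kk with hd
  have hdl : d.length = prompt.toList.length - kk := by simp [hd]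
  have m1 : ("###" : String).toList <+: ("### Input:" : String).toList := by decide
  have m2 : ("###" : String).toList <+: ("### Response:" : String).toList := by decide
  have f3le := PySem.Chars.find_le_length d ("###" : String).toList
  have f1ge := PySem.Chars.neg_one_le_find d ("### Input:" : String).toList
  have f2ge := PySem.Chars.neg_one_le_find d ("### Response:" : String).toList
  have f3ge := PySem.Chars.neg_one_le_find d ("###" : String).toList
  simp only [List.foldl, hF, PySem.Str.len_eq]
  by_cases c1 : PySem.Chars.find d ("### Input:" : String).toList = -1
  · by_cases c2 : PySem.Chars.find d ("### Response:" : String).toList = -1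
    · split_ifs <;> omega
    · obtain ⟨h3ne, h3le⟩ := pv_find_prefix_mono d _ _ m2 c2
      split_ifs <;> omega
  · obtain ⟨h3ne, h3le1⟩ := pv_find_prefix_mono d _ _ m1 c1
    by_cases c2 : PySem.Chars.find d ("### Response:" : String).toList = -1
    · split_ifs <;> omega
    · obtain ⟨_, h3le2⟩ := pv_find_prefix_mono d _ _ m2 c2
      split_ifs <;> omega

theorem extract_equal (prompt : String) :
    extract_instruction_from_prompt_py prompt = extract_instruction_from_prompt_py_alt prompt := by
  simp only [extract_instruction_from_prompt_py, extract_instruction_from_prompt_py_alt]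
  by_cases hIn : PySem.Str.isIn "### Instruction:" prompt = true
  case neg =>
    have hfind : PySem.Str.find prompt "### Instruction:" = -1 := by
      rw [PySem.Str.find_eq_neg_one_iff]
      intro hc
      exact hIn ((PySem.Str.isIn_iff_infix _ _).mpr hc)
    rw [if_neg hIn, if_pos hfind]
  case pos =>
    have hinf := (PySem.Str.isIn_iff_infix _ _).mp hIn
    have hne : PySem.Str.find prompt "### Instruction:" ≠ -1 :=
      (PySem.Str.find_ne_neg_one_iff _ _).mpr hinf
    have h0 : 0 ≤ PySem.Chars.find prompt.toList ("### Instruction:" : String).toList := by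
      have := PySem.Chars.neg_one_le_find prompt.toList ("### Instruction:" : String).toList
      rw [PySem.Str.find_eq] at hne
      omega
    set k := (PySem.Chars.find prompt.toList ("### Instruction:" : String).toList).toNat with hkdef
    have hfk : PySem.Str.find prompt "### Instruction:" = (k : Int) := by
      rw [PySem.Str.find_eq, hkdef, Int.toNat_of_nonneg h0]
    obtain ⟨hpre, -⟩ := PySem.Chars.find_spec h0
    have hbound : k + 16 ≤ prompt.toList.length := by
      have hlen := hpre.length_le
      simp only [List.length_drop] at hlen
      have h16 : ("### Instruction:" : String).toList.length = 16 := by decide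
      have hkle : k ≤ prompt.toList.length := by
        have := PySem.Chars.find_le_length prompt.toList ("### Instruction:" : String).toList
        omega
      omega
    have hstart : PySem.Str.find prompt "### Instruction:" + PySem.Str.len "### Instruction:"
        = ((k + 16 : Nat) : Int) := by
      have h16 : PySem.Str.len "### Instruction:" = 16 := by decide
      rw [hfk, h16]; push_cast; ring
    rw [if_pos hIn, if_neg hne, hstart, pv_end_eq prompt (k + 16) hbound]
    by_cases hi : PySem.Str.strip (PySem.Str.slice prompt (some ((k + 16 : Nat) : Int))
        (some (if PySem.Str.findFrom prompt "###" ((k + 16 : Nat) : Int) = -1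
               then PySem.Str.len prompt
               else PySem.Str.findFrom prompt "###" ((k + 16 : Nat) : Int)))) = ""
    · rw [if_neg (by simpa using hi), if_pos hi]
    · rw [if_pos (by simpa using hi), if_neg hi]

-- ===== VERDICT (by name: the statement is the Claim_ definition above) =====
theorem extract_instruction_from_prompt_py_spec : Claim_equal_extract_instruction_from_prompt_py := by
  intro prompt _
  unfold Spec_extract_instruction_from_prompt_py
  exact extract_equal prompt
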